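-- pv_equiv track=rewrite | github.com/Darkness308/CTMM---PDF-in-LaTex | conversion_pipeline.py | _wrap_lists
-- ===== SOURCE A (Python) =====
-- def _wrap_lists(content: str) -> str:
--     """Wrap consecutive list items in LaTeX list environments."""
--     lines = content.split('\n')
--     result = []
--     in_list = False
--
--     for line in lines:
--         if line.strip().startswith('\\item'):
--             if not in_list:
--                 result.append('\\begin{itemize}')
--                 in_list = True
--             result.append(line)
--         else:
--             if in_list:
--                 result.append('\\end{itemize}')
--                 in_list = False
--             result.append(line)
--
--     if in_list:
--         result.append('\\end{itemize}')
--
--     return '\n'.join(result)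
-- ===== SOURCE B (Python) =====
-- def _wrap_lists(content: str) -> str:
--     """Wrap consecutive list items in LaTeX list environments (run-partition pass)."""
--     lines = content.split('\n')
--     out = []
--     i, n = 0, len(lines)
--     while i < n:
--         if lines[i].strip().startswith('\\item'):
--             j = i + 1
--             while j < n and lines[j].strip().startswith('\\item'):
--                 j += 1
--             out.append('\\begin{itemize}')
--             out.extend(lines[i:j])
--             out.append('\\end{itemize}')
--             i = j
--         else:
--             out.append(lines[i])
--             i += 1
--     return '\n'.join(out)
-- ===== Notes on version B (the rewrite author's own statement) =====
-- stated objective: alternative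
-- what changed: Replaces the running in_list flag and per-line state updates with an explicit run-partition: an outer loop that, on hitting an \item line, scans the whole maximal run and emits begin/run/end at once.
import Mathlib
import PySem

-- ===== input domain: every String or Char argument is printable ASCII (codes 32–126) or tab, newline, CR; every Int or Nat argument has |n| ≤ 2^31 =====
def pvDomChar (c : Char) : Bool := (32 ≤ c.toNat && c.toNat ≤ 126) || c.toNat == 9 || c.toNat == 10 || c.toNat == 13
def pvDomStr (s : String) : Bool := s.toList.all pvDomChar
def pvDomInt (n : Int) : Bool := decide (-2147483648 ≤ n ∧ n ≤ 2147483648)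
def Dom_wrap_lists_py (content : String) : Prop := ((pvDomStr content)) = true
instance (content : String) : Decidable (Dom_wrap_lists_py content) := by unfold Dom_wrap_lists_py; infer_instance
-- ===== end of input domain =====

-- B replaces A's running in_list flag with an explicit run-partition pass (alternative decomposition, same cost).

-- ===== PORT A =====
-- A's loop: fold over the lines carrying (result, in_list); close the open list at the end.
def wrap_lists_py (content : String) : String :=
  let lines := ((PySem.Str.split? content "\n").getD [])
  let fin := lines.foldl (fun (st : List String × Bool) line =>
    if PySem.Str.startswith (PySem.Str.strip line) "\\item" then
      let st := if !st.2 then (st.1 ++ ["\\begin{itemize}"], true) else st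
      (st.1 ++ [line], st.2)
    else
      let st := if st.2 then (st.1 ++ ["\\end{itemize}"], false) else st
      (st.1 ++ [line], st.2)) ([], false)
  let res := if fin.2 then fin.1 ++ ["\\end{itemize}"] else fin.1
  PySem.Str.join "\n" res

-- ===== PORT B =====
def pvIsItem (line : String) : Bool := PySem.Str.startswith (PySem.Str.strip line) "\\item"

-- B's outer loop: on an \item line take the whole maximal run (inner while j loop /
-- lines[i:j] = takeWhile/dropWhile) and wrap it; otherwise copy the line.
def pvRuns : List String → List String
  | [] => []
  | l :: ls =>
    if pvIsItem l then
      "\\begin{itemize}" :: (l :: ls.takeWhile pvIsItem) ++ ["\\end{itemize}"]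
        ++ pvRuns (ls.dropWhile pvIsItem)
    else
      l :: pvRuns ls
termination_by ls => ls.length
decreasing_by
  · exact Nat.lt_succ_of_le (List.length_dropWhile_le _ _)
  · simp

def wrap_lists_py_alt (content : String) : String :=
  PySem.Str.join "\n" (pvRuns (((PySem.Str.split? content "\n").getD [])))

-- ===== PRECONDITION & SPEC =====
def Spec_wrap_lists_py (content : String) (out : String) : Prop := out = wrap_lists_py_alt content
instance (content : String) (out : String) : Decidable (Spec_wrap_lists_py content out) := by unfold Spec_wrap_lists_py; infer_instance

-- ===== CLAIM (what is proved, stated in full; the proofs are below) =====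
def Claim_equal_wrap_lists_py : Prop := ∀ (content : String), Dom_wrap_lists_py content → Spec_wrap_lists_py content (wrap_lists_py content)

-- ===== LEMMAS AND PROOFS =====

-- Characterisation of what A's fold emits after the current position, given the flag b.
def pvF (b : Bool) : List String → List String
  | [] => if b then ["\\end{itemize}"] else []
  | l :: ls =>
    if pvIsItem l then
      if b then l :: pvF true ls else "\\begin{itemize}" :: l :: pvF true ls
    else
      if b then "\\end{itemize}" :: l :: pvF false ls else l :: pvF false ls

theorem pvFoldA (ls : List String) : ∀ (acc : List String) (b : Bool),
    (let fin := ls.foldl (fun (st : List String × Bool) line =>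
        if PySem.Str.startswith (PySem.Str.strip line) "\\item" then
          let st := if !st.2 then (st.1 ++ ["\\begin{itemize}"], true) else st
          (st.1 ++ [line], st.2)
        else
          let st := if st.2 then (st.1 ++ ["\\end{itemize}"], false) else st
          (st.1 ++ [line], st.2)) (acc, b)
      if fin.2 then fin.1 ++ ["\\end{itemize}"] else fin.1)
    = acc ++ pvF b ls := by
  induction ls with
  | nil => intro acc b; cases b <;> simp [pvF]
  | cons l ls ih =>
    intro acc b
    by_cases hp : PySem.Str.startswith (PySem.Str.strip l) "\\item" <;> cases b <;>
      simp only [List.foldl_cons, hp, pvF, pvIsItem, Bool.not_false, Bool.not_true,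
        if_true, if_false, Bool.false_eq_true] <;>
      rw [ih] <;> simp

theorem pvF_true (ls : List String) :
    pvF true ls = ls.takeWhile pvIsItem ++ "\\end{itemize}" :: pvF false (ls.dropWhile pvIsItem) := by
  induction ls with
  | nil => simp [pvF]
  | cons l ls ih =>
    by_cases hp : pvIsItem l <;> simp [pvF, hp, List.takeWhile, List.dropWhile, ih]

theorem pvF_false_eq_runs (ls : List String) : pvF false ls = pvRuns ls := by
  induction ls using pvRuns.induct with
  | case1 => simp [pvF, pvRuns]
  | case2 l ls hp ih =>
    rw [pvRuns, if_pos hp]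
    simp [pvF, hp, pvF_true, ih]
  | case3 l ls hp ih =>
    rw [pvRuns, if_neg hp]
    simp [pvF, hp, ih]

-- ===== VERDICT (by name: the statement is the Claim_ definition above) =====
theorem wrap_lists_py_spec : Claim_equal_wrap_lists_py := by
  intro content _
  unfold Spec_wrap_lists_py wrap_lists_py wrap_lists_py_alt
  dsimp only
  have h := pvFoldA ((PySem.Str.split? content "\n").getD []) [] false
  dsimp only at h
  rw [h, pvF_false_eq_runs]
  simp
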